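-- pv_equiv track=rewrite | github.com/tehoro/ibf | src/ibf/util/naming.py | generate_unique_location_names
-- ===== SOURCE A (Python) =====
-- from collections import defaultdict
-- from typing import Sequence, List
--
-- def generate_unique_location_names(names: Sequence[str], kinds: Sequence[str]) -> List[str]:
--     """
--     Generate unique display names for locations to avoid conflicts when multiple
--     forecasts exist for the same location name (e.g., deterministic vs ensemble).
--
--     Returns a list of unique display names in the same order as the inputs.
--     For duplicates, appends suffixes like " (Deterministic)", " (Ensemble)", or " 1", " 2".
--     """
--     if len(names) != len(kinds):
--         raise ValueError("names and kinds must have the same length.")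
--
--     name_counts: dict[str, int] = {}
--     name_kinds_all: dict[str, set[str]] = defaultdict(set)
--
--     for name, kind in zip(names, kinds):
--         name_counts[name] = name_counts.get(name, 0) + 1
--         name_kinds_all[name].add(kind)
--
--     name_should_use_kinds = {
--         name: (count == 2 and len(name_kinds_all[name]) == 2)
--         for name, count in name_counts.items()
--     }
--
--     result: List[str] = []
--     name_occurrences: dict[str, int] = {}
--
--     for name, kind in zip(names, kinds):
--         if name_counts[name] == 1:
--             result.append(name)
--             continue
--
--         occurrence = name_occurrences.get(name, 0) + 1
--         name_occurrences[name] = occurrence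
--
--         if name_should_use_kinds[name]:
--             if kind == "deterministic":
--                 result.append(f"{name} (Deterministic)")
--             else:
--                 result.append(f"{name} (Ensemble)")
--         else:
--             result.append(f"{name} {occurrence}")
--
--     return result
-- ===== SOURCE B (Python) =====
-- def generate_unique_location_names(names, kinds):
--     if len(names) != len(kinds):
--         raise ValueError("names and kinds must have the same length.")
--     pairs = list(zip(names, kinds))
--     out = []
--     for i, (name, kind) in enumerate(pairs):
--         group = [k for n, k in pairs if n == name]
--         if len(group) == 1:
--             out.append(name)
--         elif len(group) == 2 and group[0] != group[1]:
--             if kind == "deterministic":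
--                 out.append(f"{name} (Deterministic)")
--             else:
--                 out.append(f"{name} (Ensemble)")
--         else:
--             occ = 1 + sum(1 for n, _ in pairs[:i] if n == name)
--             out.append(f"{name} {occ}")
--     return out
-- ===== Notes on version B (the rewrite author's own statement) =====
-- stated objective: alternative
-- what changed: B drops A's three dict-building passes (counts, kind-sets, should-use-kinds, occurrence dict) and computes each output entry by a per-element closed form over the zipped pair list: the element's kind group via a filter and its 1-based occurrence via a prefix count.
import Mathlib
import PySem

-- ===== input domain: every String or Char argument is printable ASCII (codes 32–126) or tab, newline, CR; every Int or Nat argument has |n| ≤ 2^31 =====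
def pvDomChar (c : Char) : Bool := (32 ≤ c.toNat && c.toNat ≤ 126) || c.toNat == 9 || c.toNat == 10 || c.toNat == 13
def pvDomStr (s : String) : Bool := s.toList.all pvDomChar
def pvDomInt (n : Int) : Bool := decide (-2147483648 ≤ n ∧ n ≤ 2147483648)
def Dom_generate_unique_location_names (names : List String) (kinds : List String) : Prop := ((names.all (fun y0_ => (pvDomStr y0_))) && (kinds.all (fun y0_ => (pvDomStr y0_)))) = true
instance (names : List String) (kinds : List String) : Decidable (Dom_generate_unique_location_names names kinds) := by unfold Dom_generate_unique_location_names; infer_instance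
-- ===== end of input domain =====

-- B replaces A's dict passes by a per-element closed form (group filter + prefix count); objective: alternative.
-- Equivalence is about the RETURN value; neither program mutates its arguments.

-- ===== PORT A =====
-- One step of A's second loop ('for name, kind in zip(...)'): state = (result, name_occurrences).
def pvAStep (name_counts : PySem.Dict String Int) (should : PySem.Dict String Bool)
    (s : List String × PySem.Dict String Int) (p : String × String) :
    List String × PySem.Dict String Int :=
  if name_counts.getD p.1 0 = 1 then (s.1 ++ [p.1], s.2)
  else
    let occurrence := s.2.getD p.1 0 + 1
    let occ' := s.2.insert p.1 occurrence
    if should.getD p.1 false then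
      if p.2 == "deterministic" then (s.1 ++ [p.1 ++ " (Deterministic)"], occ')
      else (s.1 ++ [p.1 ++ " (Ensemble)"], occ')
    else (s.1 ++ [p.1 ++ " " ++ PySem.Int.toStr occurrence], occ')

def generate_unique_location_names (names : List String) (kinds : List String) : List String :=
  if names.length ≠ kinds.length then []  -- A raises ValueError here; excluded by Pre_
  else
    let pairs := names.zip kinds
    -- first loop: name_counts and name_kinds_all built together
    let st := pairs.foldl
      (fun (s : PySem.Dict String Int × PySem.Dict String (PySem.Set String)) p =>
        (s.1.insert p.1 (s.1.getD p.1 0 + 1),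
         s.2.modify p.1 PySem.Set.empty (fun t => PySem.Set.add t p.2)))
      (PySem.Dict.empty, PySem.Dict.empty)
    let name_counts := st.1
    let name_kinds_all := st.2
    -- dict comprehension over name_counts.items()
    let should : PySem.Dict String Bool := name_counts.items.foldl
      (fun (d : PySem.Dict String Bool) (p : String × Int) =>
        d.insert p.1 (decide (p.2 = 2 ∧ (name_kinds_all.getD p.1 (PySem.Set.empty : PySem.Set String)).length = 2)))
      PySem.Dict.empty
    -- second loop
    (pairs.foldl (pvAStep name_counts should) (([], PySem.Dict.empty) : List String × PySem.Dict String Int)).1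

-- ===== PORT B =====
-- B's per-element display: group = kinds of all pairs with this name; occurrence = prefix count.
-- 'group[0] != group[1]' is ported on Option (the branch only fires when len(group) == 2, where both are 'some').
def pvBDisplay (pairs : List (String × String)) (i : Int) (p : String × String) : String :=
  let group := (pairs.filter (fun q => q.1 == p.1)).map (fun q => q.2)
  if group.length = 1 then p.1
  else if group.length = 2 ∧ group[0]? ≠ group[1]? then
    if p.2 == "deterministic" then p.1 ++ " (Deterministic)" else p.1 ++ " (Ensemble)"
  else p.1 ++ " " ++ PySem.Int.toStr (1 + (((pairs.take i.toNat).filter (fun q => q.1 == p.1)).length : Int))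

def generate_unique_location_names_alt (names : List String) (kinds : List String) : List String :=
  if names.length ≠ kinds.length then []  -- B raises ValueError here; excluded by Pre_
  else
    let pairs := names.zip kinds
    (PySem.List.enumerate pairs).map (fun e => pvBDisplay pairs e.1 e.2)

-- ===== PRECONDITION & SPEC =====
-- Pre_ excludes exactly the inputs where both A and B raise ValueError (length mismatch).
def Pre_generate_unique_location_names (names : List String) (kinds : List String) : Prop :=
  names.length = kinds.length
instance (names : List String) (kinds : List String) : Decidable (Pre_generate_unique_location_names names kinds) := by
  unfold Pre_generate_unique_location_names; infer_instance
def pvWitness_generate_unique_location_names : List String × List String :=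
  (["Paris", "Paris", "Oslo"], ["deterministic", "ensemble", "ensemble"])

def Spec_generate_unique_location_names (names : List String) (kinds : List String) (out : List String) : Prop := out = generate_unique_location_names_alt names kinds
instance (names : List String) (kinds : List String) (out : List String) : Decidable (Spec_generate_unique_location_names names kinds out) := by unfold Spec_generate_unique_location_names; infer_instance

-- ===== CLAIM (what is proved, stated in full; the proofs are below) =====
def Claim_equal_generate_unique_location_names : Prop := ∀ (names : List String) (kinds : List String), Dom_generate_unique_location_names names kinds → Pre_generate_unique_location_names names kinds → Spec_generate_unique_location_names names kinds (generate_unique_location_names names kinds)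

-- ===== LEMMAS AND PROOFS =====

-- count of matching pairs, as A's first dict computes it
theorem pv_counts_getD (l : List (String × String)) (d : PySem.Dict String Int) (x : String) :
    (l.foldl (fun d p => d.insert p.1 (d.getD p.1 0 + 1)) d).getD x 0
      = d.getD x 0 + ((l.filter (fun q => q.1 == x)).length : Int) := by
  rw [show l.foldl (fun d (p : String × String) => d.insert p.1 (d.getD p.1 0 + 1)) d
        = (l.map Prod.fst).foldl (fun d n => d.insert n (d.getD n 0 + 1)) d from by
      rw [List.foldl_map]]
  rw [PySem.Dict.getD_foldl_insert_add_one]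
  congr 1
  rw [List.count_eq_countP, List.countP_map, List.countP_eq_length_filter]
  rfl

-- the kind-set dict of A's first loop
theorem pv_kinds_getD (l : List (String × String)) (d : PySem.Dict String (PySem.Set String)) (x : String) :
    (l.foldl (fun d p => d.modify p.1 PySem.Set.empty (fun t => PySem.Set.add t p.2)) d).getD x PySem.Set.empty
      = PySem.Set.update (d.getD x PySem.Set.empty) (((l.filter (fun q => q.1 == x)).map Prod.snd)) := by
  induction l generalizing d with
  | nil => simp [PySem.Set.update]
  | cons p l ih =>
    simp only [List.foldl_cons, ih, List.filter_cons]
    by_cases h : p.1 = x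
    · subst h
      rw [PySem.Dict.getD_modify_self]
      simp [PySem.Set.update]
    · rw [PySem.Dict.getD_modify, if_neg (fun hh => h hh.symm)]
      simp [show (p.1 == x) = false from by simpa using h]

-- lookup in a dict built by inserting distinct fresh keys
theorem pv_getD_insert_map (l : List (String × Int)) (hnd : (l.map Prod.fst).Nodup)
    (f : String × Int → Bool) (x : String) (c : Int) (hx : (x, c) ∈ l) :
    (l.foldl (fun d p => d.insert p.1 (f p)) PySem.Dict.empty).getD x false = f (x, c) := by
  have hitems : (l.foldl (fun d p => d.insert p.1 (f p)) PySem.Dict.empty).items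
      = PySem.Dict.empty.items ++ l.map (fun p => (p.1, f p)) := by
    exact PySem.Dict.items_foldl_insert_fresh (k := Prod.fst) (v := f) (l := l)
      (d := PySem.Dict.empty) (fun a _ => PySem.Dict.contains_empty _) hnd
  have hkeys : (l.foldl (fun d p => d.insert p.1 (f p)) PySem.Dict.empty).keys.Nodup :=
    PySem.Dict.nodup_keys_foldl_insert_key l Prod.fst (fun d p => f p) PySem.Dict.empty
      (by simp)
  apply PySem.Dict.getD_of_mem_items
  · rw [hitems]
    simp only [PySem.Dict.empty, List.nil_append]
    exact List.mem_map.mpr ⟨(x, c), hx, rfl⟩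
  · exact hkeys

-- the boolean A stores in name_should_use_kinds, rephrased as B's test on the group
theorem pv_should_iff (g : List String) :
    ((g.length : Int) = 2 ∧ (PySem.Set.ofList g).length = 2) ↔ (g.length = 2 ∧ g[0]? ≠ g[1]?) := by
  constructor
  · rintro ⟨h2, hs⟩
    have h2' : g.length = 2 := by exact_mod_cast h2
    match g, h2' with
    | [a, b], _ =>
      refine ⟨rfl, ?_⟩
      by_cases hab : a = b
      · subst hab
        simp [PySem.Set.ofList, PySem.Set.add, PySem.Set.empty, PySem.Set.contains] at hs
      · simp
        exact hab
  · rintro ⟨h2, hne⟩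
    match g, h2 with
    | [a, b], _ =>
      have hab : a ≠ b := by simpa using hne
      refine ⟨by norm_num, ?_⟩
      simp only [PySem.Set.ofList]
      simp [Ne.symm hab]

-- A's second loop against B's per-element map, by suffix induction with an occurrence invariant
theorem pv_loop (all : List (String × String)) (NC : PySem.Dict String Int) (SH : PySem.Dict String Bool)
    (hNC : ∀ x, NC.getD x 0 = ((all.filter (fun q => q.1 == x)).length : Int))
    (hSH : ∀ x, x ∈ all.map Prod.fst → SH.getD x false
        = decide (((all.filter (fun q => q.1 == x)).length : Int) = 2
            ∧ (PySem.Set.ofList ((all.filter (fun q => q.1 == x)).map Prod.snd)).length = 2))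
    (rest : List (String × String)) :
    ∀ (done : List (String × String)), all = done ++ rest →
    ∀ (res : List String) (occ : PySem.Dict String Int),
    (∀ x, (all.filter (fun q => q.1 == x)).length ≠ 1 →
        occ.getD x 0 = ((done.filter (fun q => q.1 == x)).length : Int)) →
    (rest.foldl (pvAStep NC SH) (res, occ)).1
      = res ++ (PySem.List.enumerate rest (done.length : Int)).map (fun e => pvBDisplay all e.1 e.2) := by
  induction rest with
  | nil => intro done hall res occ hocc; simp [PySem.List.enumerate]
  | cons p rest ih =>
    intro done hall res occ hocc
    have hmem : p.1 ∈ all.map Prod.fst := by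
      rw [hall]; simp
    have hcnt : 1 ≤ (all.filter (fun q => q.1 == p.1)).length := by
      have : p ∈ all.filter (fun q => q.1 == p.1) := by
        rw [hall]; simp [List.mem_filter]
      exact List.length_pos_of_mem this
    rw [PySem.List.enumerate_cons, List.map_cons, List.foldl_cons]
    have hgroup_len : ((all.filter (fun q => q.1 == p.1)).map Prod.snd).length
        = (all.filter (fun q => q.1 == p.1)).length := by simp
    by_cases h1 : (all.filter (fun q => q.1 == p.1)).length = 1
    · -- unique name: A appends the bare name, occ untouched
      have hstep : pvAStep NC SH (res, occ) p = (res ++ [p.1], occ) := by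
        unfold pvAStep
        rw [if_pos (by rw [hNC p.1, h1]; norm_num)]
      rw [hstep]
      have hB : pvBDisplay all (done.length : Int) p = p.1 := by
        unfold pvBDisplay
        rw [if_pos (by rw [hgroup_len, h1])]
      rw [hB]
      have := ih (done ++ [p]) (by rw [hall, List.append_assoc]; rfl) (res ++ [p.1]) occ ?_
      · rw [this]
        simp [List.append_assoc]
      · intro x hx
        rw [hocc x hx, List.filter_append]
        have hne : (p.1 == x) = false := by
          by_contra hc
          have : p.1 = x := by
            have := eq_true_of_ne_false hc
            simpa using this
          rw [this] at h1
          exact hx h1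
        simp [hne]
    · -- duplicated name
      have hocc_p := hocc p.1 h1
      have hA_not1 : ¬ NC.getD p.1 0 = 1 := by
        rw [hNC p.1]
        intro hc
        exact h1 (by exact_mod_cast hc)
      have hB_not1 : ¬ ((all.filter (fun q => q.1 == p.1)).map Prod.snd).length = 1 := by
        rw [hgroup_len]; exact h1
      have hSHp := hSH p.1 hmem
      set cond := ((all.filter (fun q => q.1 == p.1)).map Prod.snd).length = 2
          ∧ ((all.filter (fun q => q.1 == p.1)).map Prod.snd)[0]? ≠ ((all.filter (fun q => q.1 == p.1)).map Prod.snd)[1]? with hcond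
      have hSH_eq : SH.getD p.1 false = decide cond := by
        rw [hSHp]
        refine decide_eq_decide.mpr ?_
        rw [hcond, ← hgroup_len]
        exact pv_should_iff _
      have hinv : ∀ (occ' : PySem.Dict String Int),
          occ' = occ.insert p.1 (occ.getD p.1 0 + 1) →
          (∀ x, (all.filter (fun q => q.1 == x)).length ≠ 1 →
            occ'.getD x 0 = (((done ++ [p]).filter (fun q => q.1 == x)).length : Int)) := by
        intro occ' ho x hx
        subst ho
        rw [PySem.Dict.getD_insert]
        by_cases hxp : x = p.1
        · subst hxp
          rw [if_pos rfl, hocc_p, List.filter_append]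
          simp
        · rw [if_neg hxp, hocc x hx, List.filter_append]
          have hne : (p.1 == x) = false := by
            simp only [beq_eq_false_iff_ne]
            exact fun h => hxp h.symm
          simp [hne]
      by_cases hc : cond
      · -- kind suffixes
        have hstep : pvAStep NC SH (res, occ) p
            = ((if p.2 == "deterministic" then res ++ [p.1 ++ " (Deterministic)"]
                else res ++ [p.1 ++ " (Ensemble)"]), occ.insert p.1 (occ.getD p.1 0 + 1)) := by
          unfold pvAStep
          rw [if_neg hA_not1, hSH_eq]
          rw [if_pos (decide_eq_true hc)]
          by_cases hk : (p.2 == "deterministic") = true <;> simp [hk]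
        have hB : pvBDisplay all (done.length : Int) p
            = (if p.2 == "deterministic" then p.1 ++ " (Deterministic)" else p.1 ++ " (Ensemble)") := by
          unfold pvBDisplay
          rw [if_neg hB_not1, if_pos hc]
        rw [hstep, hB]
        have := ih (done ++ [p]) (by rw [hall, List.append_assoc]; rfl)
          (if p.2 == "deterministic" then res ++ [p.1 ++ " (Deterministic)"]
            else res ++ [p.1 ++ " (Ensemble)"])
          (occ.insert p.1 (occ.getD p.1 0 + 1)) (hinv _ rfl)
        rw [this]
        by_cases hk : (p.2 == "deterministic") = true <;>
          simp [hk, List.append_assoc]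
      · -- numeric suffixes
        have hstep : pvAStep NC SH (res, occ) p
            = (res ++ [p.1 ++ " " ++ PySem.Int.toStr (occ.getD p.1 0 + 1)],
               occ.insert p.1 (occ.getD p.1 0 + 1)) := by
          unfold pvAStep
          rw [if_neg hA_not1, hSH_eq]
          rw [if_neg (show ¬ (decide cond = true) from by simpa using hc)]
        have hB : pvBDisplay all (done.length : Int) p
            = p.1 ++ " " ++ PySem.Int.toStr (occ.getD p.1 0 + 1) := by
          unfold pvBDisplay
          rw [if_neg hB_not1, if_neg hc]
          congr 2
          rw [hocc_p]
          have htake : all.take ((done.length : Int)).toNat = done := by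
            rw [hall, Int.toNat_natCast, List.take_left]
          rw [htake]
          ring
        rw [hstep, hB]
        have := ih (done ++ [p]) (by rw [hall, List.append_assoc]; rfl)
          (res ++ [p.1 ++ " " ++ PySem.Int.toStr (occ.getD p.1 0 + 1)])
          (occ.insert p.1 (occ.getD p.1 0 + 1)) (hinv _ rfl)
        rw [this]
        simp [List.append_assoc]

-- ===== VERDICT (by name: the statement is the Claim_ definition above) =====
theorem generate_unique_location_names_spec : Claim_equal_generate_unique_location_names := by
  intro names kinds _ hpre
  unfold Spec_generate_unique_location_names
  unfold generate_unique_location_names generate_unique_location_names_alt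
  have hlen : ¬ names.length ≠ kinds.length := by simpa using hpre
  rw [if_neg hlen, if_neg hlen]
  dsimp only
  rw [PySem.List.foldl_prod_mk
    (f := fun (d : PySem.Dict String Int) (p : String × String) => d.insert p.1 (d.getD p.1 0 + 1))
    (g := fun (d : PySem.Dict String (PySem.Set String)) (p : String × String) =>
      d.modify p.1 PySem.Set.empty (fun t => PySem.Set.add t p.2))]
  dsimp only
  set pairs := names.zip kinds with hpairs
  set NC := pairs.foldl (fun (d : PySem.Dict String Int) p => d.insert p.1 (d.getD p.1 0 + 1))
    PySem.Dict.empty with hNCdef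
  set KA := pairs.foldl (fun (d : PySem.Dict String (PySem.Set String)) p =>
    d.modify p.1 PySem.Set.empty (fun t => PySem.Set.add t p.2)) PySem.Dict.empty with hKAdef
  have hNC : ∀ x, NC.getD x 0 = ((pairs.filter (fun q => q.1 == x)).length : Int) := by
    intro x
    rw [hNCdef, pv_counts_getD]
    simp
  have hKA : ∀ x, KA.getD x PySem.Set.empty
      = PySem.Set.ofList ((pairs.filter (fun q => q.1 == x)).map Prod.snd) := by
    intro x
    rw [hKAdef, pv_kinds_getD]
    simp [PySem.Set.update, PySem.Set.ofList_eq_foldl, PySem.Dict.getD_empty, PySem.Set.empty]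
  have hNCnodup : NC.keys.Nodup := by
    rw [hNCdef]
    exact PySem.Dict.nodup_keys_foldl_insert_key pairs Prod.fst _ PySem.Dict.empty (by simp)
  have hSH : ∀ x, x ∈ pairs.map Prod.fst →
      (NC.items.foldl (fun (d : PySem.Dict String Bool) (p : String × Int) =>
          d.insert p.1 (decide (p.2 = 2 ∧ (KA.getD p.1 (PySem.Set.empty : PySem.Set String)).length = 2)))
        PySem.Dict.empty).getD x false
      = decide (((pairs.filter (fun q => q.1 == x)).length : Int) = 2
          ∧ (PySem.Set.ofList ((pairs.filter (fun q => q.1 == x)).map Prod.snd)).length = 2) := by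
    intro x hx
    have hkeys : NC.keys = PySem.Set.ofList (pairs.map Prod.fst) := by
      rw [hNCdef, PySem.Dict.keys_foldl_insert_key]
      simp [PySem.Set.update, PySem.Set.ofList_eq_foldl]
    have hxk : x ∈ NC.keys := by
      rw [hkeys]
      exact (PySem.Set.mem_ofList _ _).mpr hx
    have hitems : NC.items = NC.keys.map (fun k => (k, NC.getD k 0)) :=
      PySem.Dict.items_eq_map_keys NC hNCnodup 0
    have hmemi : (x, NC.getD x 0) ∈ NC.items := by
      rw [hitems]
      exact List.mem_map.mpr ⟨x, hxk, rfl⟩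
    have hnd : (NC.items.map Prod.fst).Nodup := hNCnodup
    rw [pv_getD_insert_map NC.items hnd _ x (NC.getD x 0) hmemi]
    refine decide_eq_decide.mpr ?_
    rw [hNC x, hKA x]
  rw [pv_loop pairs NC _ hNC hSH pairs [] rfl []
    PySem.Dict.empty (by intro x _; simp)]
  simp
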